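-- pv_equiv track=rewrite | github.com/jacklvd/leetcode_track | array/buychoco.py | solution
-- ===== SOURCE A (Python) =====
-- def solution(prices, money):
--     min1 = min(prices[0], prices[1])
--     min2 = max(prices[0], prices[1])
--     for i in range(2, len(prices)):
--         price = prices[i]
--         if price < min1:
--             min2 = min1
--             min1 = price
--         elif price < min2:
--             min2 = price
--     leftover = money - min1 - min2
--     if leftover < 0:
--         return money
--     return leftover
-- ===== SOURCE B (Python) =====
-- def solution(prices, money):
--     s = sorted(prices)
--     leftover = money - s[0] - s[1]
--     if leftover < 0:
--         return money
--     return leftover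
-- ===== Notes on version B (the rewrite author's own statement) =====
-- stated objective: simpler
-- what changed: Replaces the single-pass two-minimum tracking loop with sort-then-pick: sort a copy of prices and take the first two elements.
import Mathlib
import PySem

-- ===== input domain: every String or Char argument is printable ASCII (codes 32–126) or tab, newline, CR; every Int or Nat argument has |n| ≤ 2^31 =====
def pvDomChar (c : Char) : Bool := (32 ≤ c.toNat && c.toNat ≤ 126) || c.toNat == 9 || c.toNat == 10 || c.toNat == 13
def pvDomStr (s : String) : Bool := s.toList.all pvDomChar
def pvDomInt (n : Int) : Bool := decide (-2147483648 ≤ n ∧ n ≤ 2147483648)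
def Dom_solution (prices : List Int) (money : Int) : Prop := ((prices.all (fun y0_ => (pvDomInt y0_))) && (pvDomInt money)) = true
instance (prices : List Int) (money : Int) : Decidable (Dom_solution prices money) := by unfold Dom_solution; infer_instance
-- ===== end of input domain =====

-- B replaces A's single-pass two-minimum tracking loop with sort-then-pick (sorted copy, take first two); return value only, neither mutates its argument.

-- ===== PORT A =====
-- the loop body of A: update the (min1, min2) pair with one price
def pvStep (s : Int × Int) (price : Int) : Int × Int :=
  if price < s.1 then (price, s.1)
  else if price < s.2 then (s.1, price)
  else s

def solution (prices : List Int) (money : Int) : Int :=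
  match PySem.List.pyGet? prices 0, PySem.List.pyGet? prices 1 with
  | some p0, some p1 =>
    let st := (PySem.List.pyRange 2 (prices.length : Int) 1).foldl
      (fun s i => pvStep s (PySem.List.pyGetD prices i 0)) (min p0 p1, max p0 p1)
    let leftover := money - st.1 - st.2
    if leftover < 0 then money else leftover
  | _, _ => 0  -- unreachable under Pre_solution (Python raises IndexError)

-- ===== PORT B =====
def solution_alt (prices : List Int) (money : Int) : Int :=
  let s := PySem.List.sorted prices (fun x => x) false
  match PySem.List.pyGet? s 0 with
  | none => 0  -- unreachable under Pre_solution (Python raises IndexError)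
  | some a =>
    match PySem.List.pyGet? s 1 with
    | none => 0  -- unreachable under Pre_solution (Python raises IndexError)
    | some b =>
      let leftover := money - a - b
      if leftover < 0 then money else leftover

-- ===== PRECONDITION & SPEC =====
-- Pre_ excludes exactly the inputs where Python A raises IndexError: fewer than two prices.
def Pre_solution (prices : List Int) (money : Int) : Prop := 2 ≤ prices.length
instance (prices : List Int) (money : Int) : Decidable (Pre_solution prices money) := by unfold Pre_solution; infer_instance
def pvWitness_solution : List Int × Int := ([3, 1, 2], 5)

def Spec_solution (prices : List Int) (money : Int) (out : Int) : Prop := out = solution_alt prices money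
instance (prices : List Int) (money : Int) (out : Int) : Decidable (Spec_solution prices money out) := by unfold Spec_solution; infer_instance

-- ===== CLAIM (what is proved, stated in full; the proofs are below) =====
def Claim_equal_solution : Prop := ∀ (prices : List Int) (money : Int), Dom_solution prices money → Pre_solution prices money → Spec_solution prices money (solution prices money)

-- ===== LEMMAS AND PROOFS =====

-- A's fold keeps an ordered pair of the two smallest values seen so far:
-- the result (a, b) has a ≤ b, b never increases, and the rest r of the seen
-- elements is all ≥ b (up to permutation).
theorem pvStep_fold_spec (l : List Int) (m1 m2 : Int) (h : m1 ≤ m2) :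
    (l.foldl pvStep (m1, m2)).1 ≤ (l.foldl pvStep (m1, m2)).2 ∧
    (l.foldl pvStep (m1, m2)).2 ≤ m2 ∧
    ∃ r, (m1 :: m2 :: l).Perm ((l.foldl pvStep (m1, m2)).1 :: (l.foldl pvStep (m1, m2)).2 :: r) ∧
      ∀ z ∈ r, (l.foldl pvStep (m1, m2)).2 ≤ z := by
  induction l generalizing m1 m2 with
  | nil => exact ⟨h, le_refl _, [], List.Perm.refl _, by simp⟩
  | cons p l ih =>
    simp only [List.foldl_cons]
    have key : ∃ m1' m2' d, pvStep (m1, m2) p = (m1', m2') ∧ m1' ≤ m2' ∧ m2' ≤ m2 ∧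
        m2' ≤ d ∧ (m1 :: m2 :: p :: l).Perm (d :: m1' :: m2' :: l) := by
      unfold pvStep
      by_cases h1 : p < m1
      · exact ⟨p, m1, m2, by simp [h1], le_of_lt h1, h, h,
          (List.Perm.swap m2 m1 (p :: l)).trans (List.Perm.cons m2 (List.Perm.swap p m1 l))⟩
      · by_cases h2 : p < m2
        · exact ⟨m1, p, m2, by simp [h1, h2], not_lt.mp h1, le_of_lt h2, le_of_lt h2,
            List.Perm.swap m2 m1 (p :: l)⟩
        · exact ⟨m1, m2, p, by simp [h1, h2], h, le_refl _, not_lt.mp h2,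
            (List.Perm.cons m1 (List.Perm.swap p m2 l)).trans (List.Perm.swap p m1 (m2 :: l))⟩
    obtain ⟨m1', m2', d, hstep, hle, hm2, hd, hperm⟩ := key
    rw [hstep]
    obtain ⟨ha, hb, r, hp, hr⟩ := ih m1' m2' hle
    refine ⟨ha, le_trans hb hm2, d :: r, ?_, ?_⟩
    · exact hperm.trans ((List.Perm.cons d hp).trans
        ((List.Perm.swap _ d _).trans (List.Perm.cons _ (List.Perm.swap _ d r))))
    · intro z hz
      rcases List.mem_cons.mp hz with rfl | hz
      · exact le_trans hb hd
      · exact hr z hz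

-- ===== VERDICT (by name: the statement is the Claim_ definition above) =====
theorem solution_spec : Claim_equal_solution := by
  intro prices money _ hpre
  unfold Spec_solution
  match prices, hpre with
  | p0 :: p1 :: rest, _ =>
    unfold solution solution_alt
    have hfold : (PySem.List.pyRange 2 ((p0 :: p1 :: rest).length : Int) 1).foldl
          (fun s i => pvStep s (PySem.List.pyGetD (p0 :: p1 :: rest) i 0)) (min p0 p1, max p0 p1)
        = rest.foldl pvStep (min p0 p1, max p0 p1) := by
      have := PySem.List.foldl_pyRange_pyGetD (p0 :: p1 :: rest) 0 pvStep
        (min p0 p1, max p0 p1) (a := 2) (by omega)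
      simpa using this
    obtain ⟨ha, _, r, hperm, hr⟩ := pvStep_fold_spec rest (min p0 p1) (max p0 p1) (min_le_max)
    set a := (rest.foldl pvStep (min p0 p1, max p0 p1)).1 with ha_def
    set b := (rest.foldl pvStep (min p0 p1, max p0 p1)).2 with hb_def
    have hperm' : (a :: b :: PySem.List.sorted r (fun x => x) false).Perm (p0 :: p1 :: rest) := by
      refine List.Perm.trans ?_ (List.Perm.trans hperm.symm ?_)
      · exact List.Perm.cons a (List.Perm.cons b (PySem.List.sorted_perm r (fun x => x) false))
      · rcases le_total p0 p1 with h | h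
        · simp [min_eq_left h, max_eq_right h]
        · rw [min_eq_right h, max_eq_left h]
          exact List.Perm.swap p0 p1 rest
    have hsorted : (a :: b :: PySem.List.sorted r (fun x => x) false).Pairwise (· ≤ ·) := by
      have hsr := PySem.List.sorted_pairwise r (fun x => x)
      refine List.pairwise_cons.mpr ⟨?_, List.pairwise_cons.mpr ⟨?_, hsr⟩⟩
      · intro z hz
        rcases List.mem_cons.mp hz with rfl | hz
        · exact ha
        · exact le_trans ha (hr z ((PySem.List.mem_sorted _ _ _ _).mp hz))
      · intro z hz
        exact hr z ((PySem.List.mem_sorted _ _ _ _).mp hz)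
    have hs : PySem.List.sorted (p0 :: p1 :: rest) (fun x => x) false
        = a :: b :: PySem.List.sorted r (fun x => x) false :=
      PySem.List.sorted_id_eq_of_perm_of_pairwise _ _ hperm' hsorted
    have e0 : (0 : Int) ≤ (rest.length : Int) + 1 := by positivity
    have e1 : (0 : Int) ≤ (rest.length : Int) := by positivity
    have h0 : PySem.List.pyGet? (p0 :: p1 :: rest) 0 = some p0 := by
      simp [PySem.List.pyGet?, PySem.List.pyIdx?, e0]
    have h1 : PySem.List.pyGet? (p0 :: p1 :: rest) 1 = some p1 := by
      simp [PySem.List.pyGet?, PySem.List.pyIdx?, e1]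
    rw [hs, h0, h1]
    simp only [List.length_cons, Nat.cast_add, Nat.cast_one] at hfold
    have hrpos : (0 : Int) ≤ (r.length : Int) + 1 := by positivity
    simp [hfold, hrpos, PySem.List.pyGet?, PySem.List.pyIdx?]
    rw [← ha_def, ← hb_def]
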